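-- pv_equiv track=rewrite | github.com/kundlatsch/UFSC | TCC/Código/simulador/simulation/utils.py | get_agent_context
-- ===== SOURCE A (Python) =====
-- from typing import List, Tuple, Union
--
-- def get_agent_context(plans: List[str]) -> Tuple[List[str], List[str]]:
--     """Get the agent context (the domain of the perception function)
--
--     Args:
--         plans: List of plans. Can be get from parse_agent_plans().
--     Returns:
--         The agent's context, a 2-tuple of bodies and args.
--     """
--     bodies = []
--     args = []
--     for plan in plans:
--         plan_head = plan.split("->")[0].replace(" ", "")
--
--         body, arg = parse_perception(plan_head)
--
--         if body not in bodies: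
--             bodies.append(body)
--
--         if arg not in args:
--             args.append(arg)
--
--     return (bodies, args)
--
-- def parse_perception(perception: str) -> Tuple[str, Union[str, None]]:
--     """Get the perception body and arg.
--
--     Args:
--         perception: Perception or plan head in the format p(x).
--     Returns:
--         A 2-tuple of body and arg.
--     """
--     if "(" in perception:
--         body, arg = perception.split("(")
--         arg = arg.replace(")", "")
--         return (body, arg)
--
--     return (perception, None)
-- ===== SOURCE B (Python) =====
-- from typing import List, Tuple, Union
--
--
-- def parse_perception(perception: str) -> Tuple[str, Union[str, None]]:
--     if "(" in perception:
--         body, arg = perception.split("(")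
--         return (body, arg.replace(")", ""))
--     return (perception, None)
--
--
-- def _uniq(xs):
--     # Repeatedly take the first remaining element and FILTER all its duplicates
--     # out of the remaining input: no membership test against the output at all.
--     out = []
--     while xs:
--         head = xs[0]
--         out.append(head)
--         xs = [y for y in xs[1:] if y != head]
--     return out
--
--
-- def get_agent_context(plans: List[str]) -> Tuple[List[str], List[str]]:
--     pairs = [parse_perception(plan.split("->")[0].replace(" ", "")) for plan in plans]
--     return (_uniq([body for body, _ in pairs]), _uniq([arg for _, arg in pairs]))
-- ===== Notes on version B (the rewrite author's own statement) =====
-- stated objective: alternative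
-- what changed: A's single interleaved loop tests each parsed value against the growing output lists; B first builds all (body, arg) pairs in one parse pass, then dedups each column by repeatedly taking the first remaining element and filtering all its later duplicates out of the remaining input, so no membership test against the output exists at all.
import Mathlib
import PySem

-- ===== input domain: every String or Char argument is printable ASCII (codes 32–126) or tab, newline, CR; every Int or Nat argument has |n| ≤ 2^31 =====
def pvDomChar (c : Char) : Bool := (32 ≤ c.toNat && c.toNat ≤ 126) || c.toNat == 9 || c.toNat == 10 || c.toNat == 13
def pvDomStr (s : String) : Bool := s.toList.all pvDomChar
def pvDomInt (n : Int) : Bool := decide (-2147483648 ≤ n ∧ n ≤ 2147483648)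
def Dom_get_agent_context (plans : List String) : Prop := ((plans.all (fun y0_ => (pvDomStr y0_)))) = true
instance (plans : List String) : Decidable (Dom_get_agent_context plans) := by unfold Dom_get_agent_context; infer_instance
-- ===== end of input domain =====

-- B replaces the interleaved membership-test-and-append loop by a parse pass plus a
-- take-head-and-filter dedup loop on each column (alternative decomposition, same cost).


-- ===== PORT A =====
-- plan.split("->")[0].replace(" ", "")  (shared by A's loop body and B's comprehension)
def pvHead (plan : String) : List Char :=
  PySem.Chars.replace ((PySem.Chars.splitOn plan.toList ['-', '>']).headD []) [' '] []

-- parse_perception (the module helper both implementations call verbatim);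
-- none = the ValueError of the 2-value unpack when the head holds more than one "(" (outside Pre_)
def pvParsePerception (perception : List Char) : Option (String × Option String) :=
  if PySem.Chars.isIn ['('] perception then
    match PySem.Chars.splitOn perception ['('] with
    | [body, arg] => some (String.ofList body, some (String.ofList (PySem.Chars.replace arg [')'] [])))
    | _ => none
  else some (String.ofList perception, none)

def get_agent_context (plans : List String) : List String × List (Option String) :=
  plans.foldl (fun st plan =>
    match pvParsePerception (pvHead plan) with
    | none => st   -- Python raises ValueError here; such inputs are outside Pre_
    | some (body, arg) =>
        (if body ∈ st.1 then st.1 else st.1 ++ [body],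
         if arg ∈ st.2 then st.2 else st.2 ++ [arg])) ([], [])

-- ===== PORT B =====
-- B's _uniq while-loop: take the first remaining element, append it to out,
-- filter its duplicates out of the remaining input
def pvUniq {α : Type} [DecidableEq α] (out : List α) : List α → List α
  | [] => out
  | x :: t => pvUniq (out ++ [x]) (t.filter (fun y => y ≠ x))
termination_by l => l.length
decreasing_by
  simp only [List.length_unattach]
  exact Nat.lt_succ_of_le (le_trans (List.length_filter_le _ _) (by simp))

-- the comprehension (filterMap: where parse yields none the Python raised — outside Pre_),
-- then _uniq on each column
def get_agent_context_alt (plans : List String) : List String × List (Option String) :=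
  let pairs := plans.filterMap (fun plan => pvParsePerception (pvHead plan))
  (pvUniq [] (pairs.map Prod.fst), pvUniq [] (pairs.map Prod.snd))

-- ===== PRECONDITION & SPEC =====
-- Pre_ excludes exactly the inputs on which Python A raises ValueError (a plan head
-- containing more than one "(": parse_perception's 2-value unpack fails); B raises there too.
def Pre_get_agent_context (plans : List String) : Prop :=
  ∀ plan ∈ plans, PySem.Chars.count (pvHead plan) ['('] ≤ 1
instance (plans : List String) : Decidable (Pre_get_agent_context plans) := by
  unfold Pre_get_agent_context; infer_instance
def pvWitness_get_agent_context : List String := ["see(dog) -> go", "see(cat)->go", "hear->stop"]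
def Spec_get_agent_context (plans : List String) (out : List String × List (Option String)) : Prop := out = get_agent_context_alt plans
instance (plans : List String) (out : List String × List (Option String)) : Decidable (Spec_get_agent_context plans out) := by unfold Spec_get_agent_context; infer_instance

-- ===== CLAIM (what is proved, stated in full; the proofs are below) =====
def Claim_equal_get_agent_context : Prop := ∀ (plans : List String), Dom_get_agent_context plans → Pre_get_agent_context plans → Spec_get_agent_context plans (get_agent_context plans)

-- ===== LEMMAS AND PROOFS =====

-- the membership-test-and-append step of A's loop, as a named function
def pvMemAppend {α : Type} [DecidableEq α] (l : List α) (x : α) : List α :=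
  if x ∈ l then l else l ++ [x]

-- A's interleaved loop is the pair of the two column-wise membership-append loops over the parsed pairs.
theorem pv_fold_split (plans : List String) (bs : List String) (as_ : List (Option String)) :
    plans.foldl (fun st plan =>
      match pvParsePerception (pvHead plan) with
      | none => st
      | some (body, arg) =>
          (if body ∈ st.1 then st.1 else st.1 ++ [body],
           if arg ∈ st.2 then st.2 else st.2 ++ [arg])) (bs, as_)
    = (((plans.filterMap (fun plan => pvParsePerception (pvHead plan))).map Prod.fst).foldl
         pvMemAppend bs,
       ((plans.filterMap (fun plan => pvParsePerception (pvHead plan))).map Prod.snd).foldl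
         pvMemAppend as_) := by
  induction plans generalizing bs as_ with
  | nil => rfl
  | cons p rest ih =>
      cases h : pvParsePerception (pvHead p) with
      | none => simp [List.foldl_cons, h, ih]
      | some pr => cases pr with
        | mk b a =>
            simp only [List.foldl_cons, h, List.filterMap_cons, List.map_cons]
            rw [ih]
            by_cases hb : b ∈ bs <;> by_cases ha : a ∈ as_ <;>
              simp [pvMemAppend, hb, ha]

-- invariant linking the membership-append loop to B's take-head-and-filter loop:
-- starting from acc, the foldl only ever appends elements not in acc, and dropping
-- from the input the elements already in acc gives exactly B's loop state
theorem pv_foldl_eq_uniq_aux {α : Type} [DecidableEq α] (xs : List α) (acc : List α) :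
    xs.foldl pvMemAppend acc = pvUniq acc (xs.filter (fun y => y ∉ acc)) := by
  induction xs generalizing acc with
  | nil => simp [pvUniq]
  | cons x t ih =>
      by_cases hx : x ∈ acc
      · simpa [List.foldl_cons, pvMemAppend, hx] using ih acc
      · have hfil : t.filter (fun y => y ∉ acc ++ [x])
            = (t.filter (fun y => y ∉ acc)).filter (fun y => y ≠ x) := by
          rw [List.filter_filter]
          apply List.filter_congr
          intro y _
          simp [List.mem_append]
          exact Bool.and_comm _ _
        simp only [List.foldl_cons, pvMemAppend, if_neg hx]
        rw [ih (acc ++ [x])]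
        have : (x :: t).filter (fun y => y ∉ acc) = x :: t.filter (fun y => y ∉ acc) := by
          simp [hx]
        rw [this, pvUniq, ← hfil]

theorem pv_foldl_eq_uniq {α : Type} [DecidableEq α] (xs : List α) :
    xs.foldl pvMemAppend [] = pvUniq [] xs := by
  simpa using pv_foldl_eq_uniq_aux xs []

-- ===== VERDICT (by name: the statement is the Claim_ definition above) =====
theorem get_agent_context_spec : Claim_equal_get_agent_context := by
  intro plans _ _
  unfold Spec_get_agent_context get_agent_context get_agent_context_alt
  rw [pv_fold_split]
  rw [pv_foldl_eq_uniq, pv_foldl_eq_uniq]
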